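-- pv_equiv track=rewrite | github.com/DrGMark7/KU_ComProg | KU_ComProgramming/Elab04/15 L05 any max consec.py | find_most_adjacent_same_number
-- ===== SOURCE A (Python) =====
-- def find_most_adjacent_same_number(lst):
--     if not lst:
--         return None, 0
--
--     max_count = 1
--     current_count = 1
--     current_number = lst[0]
--     most_adjacent_number = lst[0]
--
--     for i in range(1, len(lst)):
--         if lst[i] == lst[i - 1]:
--             current_count += 1
--         else:
--             current_count = 1
--             current_number = lst[i]
--
--         if current_count > max_count:
--             max_count = current_count
--             most_adjacent_number = current_number
--
--     return [most_adjacent_number, max_count]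
-- ===== SOURCE B (Python) =====
-- def find_most_adjacent_same_number(lst):
--     if not lst:
--         return None, 0
--     # group-then-reduce: build the list of consecutive runs as [value, count] pairs,
--     # then pick the first run of maximal count.
--     runs = []
--     for v in lst:
--         if runs and runs[-1][0] == v:
--             runs[-1][1] += 1
--         else:
--             runs.append([v, 1])
--     best = runs[0]
--     for r in runs[1:]:
--         if r[1] > best[1]:
--             best = r
--     return [best[0], best[1]]
-- ===== Notes on version B (the rewrite author's own statement) =====
-- stated objective: idiomatic
-- what changed: B first builds the explicit list of consecutive (value, count) runs and then reduces it to the first run of maximal count, replacing A's single stateful scan with four loop-carried variables.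
-- outside the precondition, e.g. on find_most_adjacent_same_number([]): A returns [None, 0], B returns [None, 0]
import Mathlib
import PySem

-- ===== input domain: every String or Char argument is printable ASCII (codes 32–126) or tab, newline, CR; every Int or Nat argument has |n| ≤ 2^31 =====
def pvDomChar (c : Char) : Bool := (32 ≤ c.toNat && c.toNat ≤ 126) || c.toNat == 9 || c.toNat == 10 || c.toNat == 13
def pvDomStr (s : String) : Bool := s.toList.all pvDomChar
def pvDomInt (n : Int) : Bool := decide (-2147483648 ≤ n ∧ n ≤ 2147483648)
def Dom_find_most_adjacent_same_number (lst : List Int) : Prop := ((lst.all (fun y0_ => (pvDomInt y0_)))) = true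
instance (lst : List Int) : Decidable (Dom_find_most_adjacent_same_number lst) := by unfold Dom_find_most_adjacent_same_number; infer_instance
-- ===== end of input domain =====

-- B builds the list of consecutive (value, count) runs first and then reduces it to the
-- first run of maximal count, instead of A's single stateful scan; objective: idiomatic
-- group-then-reduce decomposition, same cost.

-- ===== PORT A =====
-- state = (max_count, current_count, current_number, most_adjacent_number)
def find_most_adjacent_same_number (lst : List Int) : List Int :=
  match lst with
  | [] => []   -- Python returns the tuple (None, 0) here, not a list of ints; excluded by Pre_
  | x :: _ =>
    let s := (PySem.List.pyRange 1 (PySem.List.len lst) 1).foldl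
      (fun (st : Int × Int × Int × Int) i =>
        let mc := st.1; let cc := st.2.1; let cn := st.2.2.1; let man := st.2.2.2
        let p := if PySem.List.pyGetD lst i 0 = PySem.List.pyGetD lst (i - 1) 0
                 then (cc + 1, cn) else (1, PySem.List.pyGetD lst i 0)
        if p.1 > mc then (p.1, p.1, p.2, p.2) else (mc, p.1, p.2, man))
      (1, 1, x, x)
    [s.2.2.2, s.1]

-- ===== PORT B =====
-- 'if runs and runs[-1][0] == v: runs[-1][1] += 1 else: runs.append([v, 1])'
def bumpRun (rs : List (Int × Int)) (v : Int) : List (Int × Int) :=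
  match rs.getLast? with
  | some (x, c) => if x = v then rs.dropLast ++ [(x, c + 1)] else rs ++ [(v, 1)]
  | none => [(v, 1)]

def find_most_adjacent_same_number_alt (lst : List Int) : List Int :=
  match lst with
  | [] => []   -- Python B returns (None, 0) here, like A; excluded by Pre_
  | _ :: _ =>
    let runs := lst.foldl bumpRun []
    match runs with
    | [] => []   -- unreachable: runs of a nonempty list is nonempty
    | r :: rs =>
      let best := rs.foldl (fun b q => if q.2 > b.2 then q else b) r
      [best.1, best.2]

-- ===== PRECONDITION & SPEC =====
-- Pre_ excludes only the empty list, on which Python A (and B) return the tuple (None, 0),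
-- which is not a value of the declared return type List Int.
def Pre_find_most_adjacent_same_number (lst : List Int) : Prop := lst ≠ []
instance (lst : List Int) : Decidable (Pre_find_most_adjacent_same_number lst) := by
  unfold Pre_find_most_adjacent_same_number; infer_instance

def pvWitness_find_most_adjacent_same_number : List Int := [1, 2, 2, 3]

def Spec_find_most_adjacent_same_number (lst : List Int) (out : List Int) : Prop := out = find_most_adjacent_same_number_alt lst
instance (lst : List Int) (out : List Int) : Decidable (Spec_find_most_adjacent_same_number lst out) := by unfold Spec_find_most_adjacent_same_number; infer_instance

-- ===== CLAIM (what is proved, stated in full; the proofs are below) =====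
def Claim_equal_find_most_adjacent_same_number : Prop := ∀ (lst : List Int), Dom_find_most_adjacent_same_number lst → Pre_find_most_adjacent_same_number lst → Spec_find_most_adjacent_same_number lst (find_most_adjacent_same_number lst)

-- ===== LEMMAS AND PROOFS =====

-- proof-side helpers ------------------------------------------------------

-- one step of A's loop, fed the previous and the current element
def stepA (st : Int × Int × Int × Int) (prev y : Int) : Int × Int × Int × Int :=
  let mc := st.1; let cc := st.2.1; let cn := st.2.2.1; let man := st.2.2.2
  let p := if y = prev then (cc + 1, cn) else (1, y)
  if p.1 > mc then (p.1, p.1, p.2, p.2) else (mc, p.1, p.2, man)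

-- A's loop as structural recursion over the tail, carrying the previous element
def loopA (prev : Int) (t : List Int) (st : Int × Int × Int × Int) : Int × Int × Int × Int :=
  match t with
  | [] => st
  | y :: t' => loopA y t' (stepA st prev y)

-- the consecutive runs of (x repeated c) ++ t
def runsAux (x : Int) (c : Int) (t : List Int) : List (Int × Int) :=
  match t with
  | [] => [(x, c)]
  | y :: t' => if y = x then runsAux x (c + 1) t' else (x, c) :: runsAux y 1 t'

def bestFold (b : Int × Int) (rs : List (Int × Int)) : Int × Int :=
  rs.foldl (fun b q => if q.2 > b.2 then q else b) b

lemma loopA_nil (prev : Int) (st : Int × Int × Int × Int) : loopA prev [] st = st := rfl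

lemma loopA_cons (prev y : Int) (t : List Int) (st : Int × Int × Int × Int) :
    loopA prev (y :: t) st = loopA y t (stepA st prev y) := rfl

-- Bridge: A's index fold over pyRange equals loopA
lemma bridge (lst : List Int) (k : Nat) (hk : 1 ≤ k) (st : Int × Int × Int × Int) :
    (PySem.List.pyRange (k : Int) (PySem.List.len lst) 1).foldl
      (fun (st : Int × Int × Int × Int) i =>
        let mc := st.1; let cc := st.2.1; let cn := st.2.2.1; let man := st.2.2.2
        let p := if PySem.List.pyGetD lst i 0 = PySem.List.pyGetD lst (i - 1) 0
                 then (cc + 1, cn) else (1, PySem.List.pyGetD lst i 0)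
        if p.1 > mc then (p.1, p.1, p.2, p.2) else (mc, p.1, p.2, man)) st
    = loopA (lst.getD (k - 1) 0) (lst.drop k) st := by
  by_cases h : k < lst.length
  · rw [PySem.List.pyRange_one_cons (by simp [PySem.List.len]; omega)]
    rw [List.foldl_cons]
    have hdrop : lst.drop k = lst[k] :: lst.drop (k + 1) := List.drop_eq_getElem_cons h
    have h1 : PySem.List.pyGetD lst (k : Int) 0 = lst[k] := by
      rw [PySem.List.pyGetD_natCast]; simp [List.getD, h]
    have h2 : PySem.List.pyGetD lst ((k : Int) - 1) 0 = lst.getD (k - 1) 0 := by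
      have : ((k : Int) - 1) = ((k - 1 : Nat) : Int) := by omega
      rw [this, PySem.List.pyGetD_natCast]
    have h3 : ((k : Int) + 1) = ((k + 1 : Nat) : Int) := by omega
    rw [h3, bridge lst (k + 1) (by omega) _]
    rw [hdrop, loopA_cons]
    congr 1
    · simp [List.getD, List.getElem?_eq_getElem h]
    · simp only [stepA, h1, h2]
  · rw [PySem.List.pyRange_one_eq_nil (by simp [PySem.List.len]; omega)]
    rw [List.drop_eq_nil_of_le (by omega)]
    rfl
termination_by lst.length - k

-- runs built by B's foldl equal runsAux
lemma bumpRun_concat (acc : List (Int × Int)) (x : Int) (c : Int) (v : Int) :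
    bumpRun (acc ++ [(x, c)]) v =
      if x = v then acc ++ [(x, c + 1)] else (acc ++ [(x, c)]) ++ [(v, 1)] := by
  simp [bumpRun]

lemma runsFold (t : List Int) : ∀ (acc : List (Int × Int)) (x : Int) (c : Int),
    List.foldl bumpRun (acc ++ [(x, c)]) t = acc ++ runsAux x c t := by
  induction t with
  | nil => intro acc x c; simp [runsAux]
  | cons y t' ih =>
    intro acc x c
    rw [List.foldl_cons, bumpRun_concat]
    by_cases h : x = y
    · simp only [if_pos h, runsAux, if_pos h.symm, ih]
    · have hne : ¬ (y = x) := fun hh => h hh.symm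
      simp only [if_neg h, runsAux, if_neg hne]
      rw [ih (acc ++ [(x, c)]) y 1]
      simp

lemma runsAux_head (t : List Int) : ∀ (x : Int) (c : Int),
    ∃ c' rest, runsAux x c t = (x, c') :: rest ∧ c ≤ c' := by
  induction t with
  | nil => intro x c; exact ⟨c, [], rfl, le_refl c⟩
  | cons y t' ih =>
    intro x c
    by_cases h : y = x
    · obtain ⟨c', rest, he, hle⟩ := ih x (c + 1)
      exact ⟨c', rest, by simp [runsAux, h, he], by omega⟩
    · exact ⟨c, runsAux y 1 t', by simp [runsAux, h], le_refl c⟩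

lemma bestFold_cons (b q : Int × Int) (rs : List (Int × Int)) :
    bestFold b (q :: rs) = bestFold (if q.2 > b.2 then q else b) rs := rfl

-- replacing a start value that the first run beats anyway
lemma bestFold_start (x c c' : Int) (b : Int × Int) (rest : List (Int × Int))
    (hb : b.2 < c) (hc : c ≤ c') :
    bestFold b ((x, c') :: rest) = bestFold (x, c) ((x, c') :: rest) := by
  rw [bestFold_cons, bestFold_cons]
  have h1 : (c' > b.2) := by omega
  by_cases h2 : c' > c
  · simp [h1, h2]
  · have hcc : c' = c := by omega
    subst hcc
    simp [hb]

-- main invariant: A's scan summarises to the first-maximal run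
lemma main_inv (t : List Int) : ∀ (prev cc mc man : Int), 1 ≤ cc → cc ≤ mc →
    (fun s : Int × Int × Int × Int => (s.2.2.2, s.1)) (loopA prev t (mc, cc, prev, man))
      = bestFold (man, mc) (runsAux prev cc t) := by
  induction t with
  | nil =>
    intro prev cc mc man h1 h2
    simp only [loopA_nil, runsAux, bestFold, List.foldl_cons, List.foldl_nil]
    have : ¬ (cc > mc) := by omega
    simp [this]
  | cons y t' ih =>
    intro prev cc mc man h1 h2
    rw [loopA_cons]
    by_cases hy : y = prev
    · subst hy
      have hstep : stepA (mc, cc, y, man) y y =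
          if cc + 1 > mc then (cc + 1, cc + 1, y, y) else (mc, cc + 1, y, man) := by
        simp [stepA]
      rw [hstep]
      have hr : runsAux y cc (y :: t') = runsAux y (cc + 1) t' := by
        simp [runsAux]
      rw [hr]
      by_cases hgt : cc + 1 > mc
      · rw [if_pos hgt, ih y (cc + 1) (cc + 1) y (by omega) (le_refl _)]
        obtain ⟨c', rest, he, hle⟩ := runsAux_head t' y (cc + 1)
        rw [he, bestFold_start y (cc + 1) c' (man, mc) rest (by omega) hle]
      · rw [if_neg hgt, ih y (cc + 1) mc man (by omega) (by omega)]
    · have hstep : stepA (mc, cc, prev, man) prev y = (mc, 1, y, man) := by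
        have : ¬ ((1 : Int) > mc) := by omega
        simp [stepA, hy, this]
      rw [hstep, ih y 1 mc man (le_refl _) (by omega)]
      have : ¬ (cc > mc) := by omega
      simp [runsAux, hy, bestFold_cons, this]

-- ===== VERDICT (by name: the statement is the Claim_ definition above) =====
theorem find_most_adjacent_same_number_spec : Claim_equal_find_most_adjacent_same_number := by
  intro lst _ hpre
  unfold Spec_find_most_adjacent_same_number
  match lst, hpre with
  | x :: t, _ =>
    show find_most_adjacent_same_number (x :: t) = find_most_adjacent_same_number_alt (x :: t)
    unfold find_most_adjacent_same_number find_most_adjacent_same_number_alt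
    simp only []
    have hb := bridge (x :: t) 1 (le_refl 1) (1, 1, x, x)
    simp only [List.getD, List.drop_one, List.tail_cons] at hb
    have hone : ((1 : Nat) : Int) = (1 : Int) := rfl
    rw [hone] at hb
    rw [hb]
    simp only [show ((x :: t)[1 - 1]?.getD 0) = x from rfl]
    have hm := main_inv t x 1 1 x (le_refl _) (le_refl _)
    have hruns : List.foldl bumpRun [] (x :: t) = runsAux x 1 t := by
      have := runsFold t [] x 1
      simpa using this
    rw [hruns]
    obtain ⟨c', rest, he, hle⟩ := runsAux_head t x 1
    rw [he] at hm ⊢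
    have hstart : bestFold (x, 1) ((x, c') :: rest) = bestFold (x, c') rest := by
      rw [bestFold_cons]
      by_cases hgt : c' > 1
      · simp [hgt]
      · have : c' = 1 := by omega
        simp [this]
    rw [hstart] at hm
    rw [Prod.ext_iff] at hm
    simp only [bestFold] at hm ⊢
    rw [hm.1, hm.2]
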